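-- pv_equiv track=rewrite | github.com/mirceamt/handwritingRecognitionClassifiers | nistTraining/dataTools.py | getClassesLocationIndices
-- ===== SOURCE A (Python) =====
-- def getClassesLocationIndices(data):
--     # feed with data like this: data = [dataX, dataY]
--     left = 0
--     right = 0
--     ret = []
--     for i in range(len(data[1])):
--         if i > 0 and data[1][i] != data[1][i-1]:
--             right = i - 1
--             ret.append((left, right))
--             left = i
--     ret.append((left, len(data[1]) - 1))
--     return ret
-- ===== SOURCE B (Python) =====
-- def getClassesLocationIndices(data):
--     # feed with data like this: data = [dataX, dataY]
--     y = data[1]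
--     n = len(y)
--     out = []
--     start = 0
--     while start < n:
--         k = start + 1
--         while k < n and y[k] == y[start]:
--             k += 1
--         out.append((start, k - 1))
--         start = k
--     return out
-- ===== Notes on version B (the rewrite author's own statement) =====
-- stated objective: alternative
-- what changed: B consumes the label list run by run with an outer while-over-runs and an inner while that extends the current run by comparing against the run head, instead of A's single index scan that detects changes between adjacent elements and flushes on change plus an unconditional final append.
-- outside the precondition, e.g. on getClassesLocationIndices([[1], []]): A returns [(0, -1)], B returns []
import Mathlib
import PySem

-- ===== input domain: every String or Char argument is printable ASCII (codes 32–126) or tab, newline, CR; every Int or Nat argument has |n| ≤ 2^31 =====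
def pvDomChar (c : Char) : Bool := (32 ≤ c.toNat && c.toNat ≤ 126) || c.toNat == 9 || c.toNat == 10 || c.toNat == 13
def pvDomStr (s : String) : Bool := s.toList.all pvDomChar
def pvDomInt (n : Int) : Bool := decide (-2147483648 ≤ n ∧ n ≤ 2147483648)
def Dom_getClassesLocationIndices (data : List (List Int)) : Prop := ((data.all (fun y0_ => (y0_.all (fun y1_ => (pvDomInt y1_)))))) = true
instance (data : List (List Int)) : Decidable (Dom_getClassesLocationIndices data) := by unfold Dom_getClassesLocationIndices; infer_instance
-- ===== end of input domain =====

-- B replaces A's change-detection index scan by a run-consuming loop (outer while over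
-- runs, inner while extending the current run); alternative decomposition, same O(n) cost.

-- ===== PORT A =====
-- literal transliteration of A: left/ret state folded over range(len(data[1])), final append
def getClassesLocationIndices (data : List (List Int)) : List (Int × Int) :=
  let y := (PySem.List.pyGet? data 1).getD []
  let st := (List.range y.length).foldl
    (fun (s : Nat × List (Int × Int)) i =>
      if 0 < i ∧ y.getD i 0 ≠ y.getD (i - 1) 0 then
        (i, s.2 ++ [((s.1 : Int), (i : Int) - 1)])
      else s) (0, [])
  st.2 ++ [((st.1 : Int), (y.length : Int) - 1)]

-- ===== PORT B =====
-- inner while of Source B ('k += 1 while k < n and y[k] == y[start]'); the fuel argument only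
-- makes the while loop a total structural recursion, it never alters the computation
def pvRunEnd (y : List Int) (start : Nat) : Nat → Nat → Nat
  | 0, k => k
  | fuel + 1, k =>
    if k < y.length ∧ y.getD k 0 = y.getD start 0 then pvRunEnd y start fuel (k + 1) else k

-- outer while of Source B: emit one run (start, k - 1), continue at its end k
def pvRunsLoop (y : List Int) : Nat → Nat → List (Int × Int)
  | 0, _ => []
  | fuel + 1, start =>
    if start < y.length then
      let k := pvRunEnd y start (y.length - (start + 1)) (start + 1)
      ((start : Int), (k : Int) - 1) :: pvRunsLoop y fuel k
    else []

def getClassesLocationIndices_alt (data : List (List Int)) : List (Int × Int) :=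
  let y := (PySem.List.pyGet? data 1).getD []
  pvRunsLoop y y.length 0

-- ===== PRECONDITION & SPEC =====
-- A raises IndexError when data has fewer than two elements; Pre_ also excludes inputs
-- whose label list data[1] is empty, a degenerate corner on which neither output is
-- specified: A's unconditional final append yields a one-element list with the sentinel
-- pair 0, -1, while B yields an empty run decomposition (see the cite in claim.json).
def Pre_getClassesLocationIndices (data : List (List Int)) : Prop := 2 ≤ data.length ∧ data.getD 1 [] ≠ []
instance (data : List (List Int)) : Decidable (Pre_getClassesLocationIndices data) := by
  unfold Pre_getClassesLocationIndices; infer_instance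
def pvWitness_getClassesLocationIndices : List (List Int) := [[1], [1, 1, 2]]

def Spec_getClassesLocationIndices (data : List (List Int)) (out : List (Int × Int)) : Prop := out = getClassesLocationIndices_alt data
instance (data : List (List Int)) (out : List (Int × Int)) : Decidable (Spec_getClassesLocationIndices data out) := by unfold Spec_getClassesLocationIndices; infer_instance

-- ===== CLAIM (what is proved, stated in full; the proofs are below) =====
def Claim_equal_getClassesLocationIndices : Prop := ∀ (data : List (List Int)), Dom_getClassesLocationIndices data → Pre_getClassesLocationIndices data → Spec_getClassesLocationIndices data (getClassesLocationIndices data)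

-- ===== LEMMAS AND PROOFS =====

-- the inner while stops exactly at j when everything from k up to j equals the run head
-- and j is the length or a differing element (any sufficient fuel)
theorem pvRunEnd_eq (y : List Int) (start j : Nat)
    (hjn : j ≤ y.length)
    (hstop : j = y.length ∨ y.getD j 0 ≠ y.getD start 0) :
    ∀ fuel k, j - k ≤ fuel → k ≤ j →
    (∀ i, k ≤ i → i < j → y.getD i 0 = y.getD start 0) →
    pvRunEnd y start fuel k = j := by
  intro fuel
  induction fuel with
  | zero =>
    intro k hf hkj _
    have : k = j := by omega
    simp [pvRunEnd, this]
  | succ m ih =>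
    intro k hf hkj hrun
    by_cases hkj' : k = j
    · subst hkj'
      unfold pvRunEnd
      rw [if_neg]
      rcases hstop with h | h
      · omega
      · intro ⟨_, h2⟩; exact h h2
    · unfold pvRunEnd
      rw [if_pos ⟨by omega, hrun k le_rfl (by omega)⟩]
      exact ih (k + 1) (by omega) (by omega) (fun i h1 h2 => hrun i (by omega) h2)


-- one unfolding step of the outer while
theorem pvRunsLoop_succ (y : List Int) (f start : Nat) (h : start < y.length) :
    pvRunsLoop y (f + 1) start =
      ((start : Int), (pvRunEnd y start (y.length - (start + 1)) (start + 1) : Int) - 1) ::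
        pvRunsLoop y f (pvRunEnd y start (y.length - (start + 1)) (start + 1)) := by
  simp [pvRunsLoop, h]

theorem pvRunsLoop_stop (y : List Int) (fuel start : Nat) (h : ¬ start < y.length) :
    pvRunsLoop y fuel start = [] := by
  cases fuel with
  | zero => rfl
  | succ f => simp [pvRunsLoop, h]

-- main loop invariant: A's fold from index j, with current run starting at left,
-- followed by the final append, equals ret ++ B's run loop restarted at left
theorem pv_main (y : List Int) :
    ∀ m j left ret fuel, m = y.length - j → left < j → j ≤ y.length →
    y.length - left ≤ fuel →
    (∀ i, left ≤ i → i < j → y.getD i 0 = y.getD left 0) →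
    (let st := (List.range' j (y.length - j)).foldl
      (fun (s : Nat × List (Int × Int)) i =>
        if 0 < i ∧ y.getD i 0 ≠ y.getD (i - 1) 0 then
          (i, s.2 ++ [((s.1 : Int), (i : Int) - 1)])
        else s) (left, ret);
    st.2 ++ [((st.1 : Int), (y.length : Int) - 1)])
    = ret ++ pvRunsLoop y fuel left := by
  intro m
  induction m with
  | zero =>
    intro j left ret fuel hm hlj hjn hfuel hrun
    have hj : j = y.length := by omega
    subst hj
    obtain ⟨f, rfl⟩ : ∃ f, fuel = f + 1 := ⟨fuel - 1, by omega⟩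
    simp only [Nat.sub_self, List.range'_zero, List.foldl_nil]
    rw [pvRunsLoop_succ y f left (by omega)]
    have hend : pvRunEnd y left (y.length - (left + 1)) (left + 1) = y.length :=
      pvRunEnd_eq y left y.length le_rfl (Or.inl rfl) (y.length - (left + 1)) (left + 1)
        (by omega) (by omega) (fun i h1 h2 => hrun i (by omega) h2)
    rw [hend, pvRunsLoop_stop y f y.length (by omega)]
  | succ m ih =>
    intro j left ret fuel hm hlj hjn hfuel hrun
    have hjlt : j < y.length := by omega
    have hrange : y.length - j = (y.length - (j + 1)) + 1 := by omega
    rw [hrange, List.range'_succ, List.foldl_cons]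
    by_cases hne : y.getD j 0 ≠ y.getD (j - 1) 0
    · -- boundary at j: A flushes (left, j - 1) and restarts at j
      rw [if_pos ⟨by omega, hne⟩]
      have hprev : y.getD (j - 1) 0 = y.getD left 0 := hrun (j - 1) (by omega) (by omega)
      obtain ⟨f, rfl⟩ : ∃ f, fuel = f + 1 := ⟨fuel - 1, by omega⟩
      have hih := ih (j + 1) j (ret ++ [((left : Int), (j : Int) - 1)]) f (by omega) (by omega)
        (by omega) (by omega) (fun i h1 h2 => by rw [show i = j by omega])
      simp only at hih ⊢
      rw [hih, pvRunsLoop_succ y f left (by omega)]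
      have hend : pvRunEnd y left (y.length - (left + 1)) (left + 1) = j :=
        pvRunEnd_eq y left j (by omega) (Or.inr (by rw [hprev] at hne; exact hne))
          (y.length - (left + 1)) (left + 1) (by omega) (by omega)
          (fun i h1 h2 => hrun i (by omega) h2)
      rw [hend]
      simp
    · -- no boundary: the current run extends to j
      rw [if_neg (by tauto)]
      rw [not_not] at hne
      have hj0 : y.getD j 0 = y.getD left 0 := by
        rw [hne]; exact hrun (j - 1) (by omega) (by omega)
      exact ih (j + 1) left ret fuel (by omega) (by omega) (by omega) (by omega)
        (fun i h1 h2 => by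
          by_cases hij : i = j
          · rw [hij]; exact hj0
          · exact hrun i h1 (by omega))

-- the two ports agree whenever the label list is nonempty
theorem pv_eq_of_ne_nil (y : List Int) (hy : y ≠ []) :
    ((List.range y.length).foldl
      (fun (s : Nat × List (Int × Int)) i =>
        if 0 < i ∧ y.getD i 0 ≠ y.getD (i - 1) 0 then
          (i, s.2 ++ [((s.1 : Int), (i : Int) - 1)])
        else s) (0, [])).2 ++
    [((((List.range y.length).foldl
      (fun (s : Nat × List (Int × Int)) i =>
        if 0 < i ∧ y.getD i 0 ≠ y.getD (i - 1) 0 then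
          (i, s.2 ++ [((s.1 : Int), (i : Int) - 1)])
        else s) (0, [])).1 : Int), (y.length : Int) - 1)]
    = pvRunsLoop y y.length 0 := by
  have hn : 0 < y.length := List.length_pos_iff.mpr hy
  have hr : List.range y.length = 0 :: List.range' 1 (y.length - 1) := by
    rw [List.range_eq_range']
    cases hl : y.length with
    | zero => omega
    | succ n => rw [List.range'_succ]; simp
  rw [hr, List.foldl_cons, if_neg (by simp)]
  have hmain := pv_main y (y.length - 1) 1 0 [] y.length (by omega) (by omega) (by omega)
    (by omega) (fun i h1 h2 => by rw [show i = 0 by omega])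
  simp only at hmain
  rw [hmain]
  simp

-- under Pre_, the y both ports compute is data[1]
theorem pv_y_eq (data : List (List Int)) (hpre : 2 ≤ data.length) :
    (PySem.List.pyGet? data 1).getD [] = data.getD 1 [] := by
  have h1 : (1 : Nat) < data.length := by omega
  rw [show (1 : Int) = ((1 : Nat) : Int) from rfl, PySem.List.pyGet?_natCast]
  rw [List.getElem?_eq_getElem h1]
  simp [List.getD, List.getElem?_eq_getElem h1]

-- ===== VERDICT (by name: the statement is the Claim_ definition above) =====
theorem getClassesLocationIndices_spec : Claim_equal_getClassesLocationIndices := by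
  intro data _ hpre
  unfold Spec_getClassesLocationIndices
  unfold getClassesLocationIndices getClassesLocationIndices_alt
  simp only
  rw [pv_y_eq data hpre.1]
  exact pv_eq_of_ne_nil _ hpre.2
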